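-- pv_equiv track=rewrite | github.com/rickhanley/JournalWings | modules/datamanager.py | get_project_and_task_columns_for_exp_change
-- ===== SOURCE A (Python) =====
-- def get_project_and_task_columns_for_exp_change(filtered_data):
--     """Gets the project and task numbers from the data - useful for the
--     expenditure type change method as we can't use the user input
--     project and task - must be the same as the source in this instance
--
--     input: filtered_data
--     output: tuple with the 2 pieces of data
--     """
--     project_column = []
--     task_column = []
--     idx = filtered_data[0].index("Project Number")
--     for row in filtered_data[1:]:
--         project_column.append(row[idx])
--     idx = filtered_data[0].index("Task Number")
--     for row in filtered_data[1:]: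
--         task_column.append(row[idx])
--     return (project_column, task_column)
-- ===== SOURCE B (Python) =====
-- def get_project_and_task_columns_for_exp_change(filtered_data):
--     header = filtered_data[0]
--     idx_p = header.index("Project Number")
--     idx_t = header.index("Task Number")
--     if len(filtered_data) <= 1:
--         return ([], [])
--     cols = list(zip(*filtered_data[1:]))
--     return (list(cols[idx_p]), list(cols[idx_t]))
-- ===== Notes on version B (the rewrite author's own statement) =====
-- stated objective: idiomatic
-- what changed: B looks up both header indices once and builds the transpose of the body rows with a single zip(*rows), then selects the two column tuples, instead of A's two separate row-by-row append loops.
import Mathlib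
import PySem

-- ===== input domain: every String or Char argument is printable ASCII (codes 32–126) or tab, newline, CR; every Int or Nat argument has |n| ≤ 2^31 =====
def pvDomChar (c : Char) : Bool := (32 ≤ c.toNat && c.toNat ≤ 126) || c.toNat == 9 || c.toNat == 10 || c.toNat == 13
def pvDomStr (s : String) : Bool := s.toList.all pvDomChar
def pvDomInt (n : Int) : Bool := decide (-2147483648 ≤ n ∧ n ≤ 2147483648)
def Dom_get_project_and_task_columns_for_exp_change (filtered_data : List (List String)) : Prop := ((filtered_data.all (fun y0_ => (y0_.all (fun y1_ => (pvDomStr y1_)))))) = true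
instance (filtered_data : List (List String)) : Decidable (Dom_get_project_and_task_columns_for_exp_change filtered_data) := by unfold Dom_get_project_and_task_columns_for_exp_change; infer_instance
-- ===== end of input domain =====

-- B builds the transpose of the body rows once (zip(*rows)) and selects the two column
-- tuples, instead of A's two separate row-by-row append loops; equivalence on Pre_.

-- ===== PORT A =====
-- literal port of A: find idx, one append loop per column; Pre_ excludes the inputs
-- where the Python raises (empty data, missing header, row too short), so the
-- `.getD` defaults are never reached on admitted inputs.
def get_project_and_task_columns_for_exp_change (filtered_data : List (List String)) : List String × List String :=
  match filtered_data with
  | [] => ([], [])   -- unreached under Pre_ (Python: IndexError on filtered_data[0])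
  | hdr :: body =>
    let idx1 := (PySem.List.index? hdr "Project Number").getD 0
    let project_column := body.foldl (fun acc row => acc ++ [((PySem.List.pyGet? row (Int.ofNat idx1)).getD "")]) []
    let idx2 := (PySem.List.index? hdr "Task Number").getD 0
    let task_column := body.foldl (fun acc row => acc ++ [((PySem.List.pyGet? row (Int.ofNat idx2)).getD "")]) []
    (project_column, task_column)

-- ===== PORT B =====
-- zip(*rows): n-ary zip, truncating at the shortest row (exact Python zip semantics).
def pvZipStar (rows : List (List String)) : List (List String) :=
  if h : rows ≠ [] ∧ rows.all (fun r => ¬ r.isEmpty) then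
    (rows.map (fun r => r.headD "")) :: pvZipStar (rows.map List.tail)
  else []
termination_by (rows.map List.length).sum
decreasing_by
  obtain ⟨hne, hall⟩ := h
  simp only [List.all_eq_true, decide_eq_true_eq] at hall
  simp only [List.map_map]
  rw [show (List.map (List.length ∘ fun x : {x // x ∈ rows} => (↑x : List String).tail) rows.attach)
        = rows.map (List.length ∘ List.tail) from by
      simp [Function.comp_def]]
  match rows, hne with
  | r :: rs, _ =>
    have h1 : r.tail.length < r.length := by
      have := hall r (by simp)
      cases r <;> simp_all
    have h2 : ((rs.map (List.length ∘ List.tail)).sum) ≤ (rs.map List.length).sum := by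
      apply List.sum_le_sum
      intro y _
      simp only [Function.comp_apply, List.length_tail]
      omega
    simp only [List.map_cons, List.sum_cons, Function.comp_apply]
    omega

def get_project_and_task_columns_for_exp_change_alt (filtered_data : List (List String)) : List String × List String :=
  match filtered_data with
  | [] => ([], [])   -- unreached under Pre_
  | hdr :: body =>
    let idx_p := (PySem.List.index? hdr "Project Number").getD 0
    let idx_t := (PySem.List.index? hdr "Task Number").getD 0
    if body.length = 0 then ([], [])
    else
      let cols := pvZipStar body
      ((cols.getD idx_p []), (cols.getD idx_t []))

-- ===== PRECONDITION & SPEC =====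
-- Pre_ is exactly A's normal-return set: data nonempty, both headers present in row 0,
-- and each body row long enough for both header indices (else Python raises).
def Pre_get_project_and_task_columns_for_exp_change (filtered_data : List (List String)) : Prop :=
  filtered_data ≠ [] ∧
  "Project Number" ∈ filtered_data.headD [] ∧ "Task Number" ∈ filtered_data.headD [] ∧
  ∀ row ∈ filtered_data.tail,
    (PySem.List.index? (filtered_data.headD []) "Project Number").getD 0 < row.length ∧
    (PySem.List.index? (filtered_data.headD []) "Task Number").getD 0 < row.length
instance (filtered_data : List (List String)) : Decidable (Pre_get_project_and_task_columns_for_exp_change filtered_data) := by unfold Pre_get_project_and_task_columns_for_exp_change; infer_instance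

def pvWitness_get_project_and_task_columns_for_exp_change : List (List String) :=
  [["Project Number", "Task Number"], ["p1", "t1"], ["p2", "t2"]]

def Spec_get_project_and_task_columns_for_exp_change (filtered_data : List (List String)) (out : List String × List String) : Prop := out = get_project_and_task_columns_for_exp_change_alt filtered_data
instance (filtered_data : List (List String)) (out : List String × List String) : Decidable (Spec_get_project_and_task_columns_for_exp_change filtered_data out) := by unfold Spec_get_project_and_task_columns_for_exp_change; infer_instance

-- ===== CLAIM (what is proved, stated in full; the proofs are below) =====
def Claim_equal_get_project_and_task_columns_for_exp_change : Prop := ∀ (filtered_data : List (List String)), Dom_get_project_and_task_columns_for_exp_change filtered_data → Pre_get_project_and_task_columns_for_exp_change filtered_data → Spec_get_project_and_task_columns_for_exp_change filtered_data (get_project_and_task_columns_for_exp_change filtered_data)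

-- ===== LEMMAS AND PROOFS =====

-- A's append loop is a map.
theorem pv_foldl_append_map (f : List String → String) :
    ∀ (l : List (List String)) (acc : List String),
      l.foldl (fun a row => a ++ [f row]) acc = acc ++ l.map f := by
  intro l
  induction l with
  | nil => simp
  | cons x xs ih => intro acc; simp [List.foldl_cons, ih]

-- the i-th row of the truncating transpose is the i-th column, when i is in
-- range of every row.
theorem pvZipStar_get (i : Nat) :
    ∀ (rows : List (List String)), rows ≠ [] → (∀ r ∈ rows, i < r.length) →
      (pvZipStar rows).getD i [] = rows.map (fun r => (r.getD i "")) := by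
  induction i with
  | zero =>
    intro rows hne hlen
    rw [pvZipStar.eq_def]
    have hall : rows.all (fun r => ¬ r.isEmpty) = true := by
      simp only [List.all_eq_true, decide_eq_true_eq]
      intro r hr
      have := hlen r hr
      cases r <;> simp_all
    rw [dif_pos ⟨hne, hall⟩]
    simp only [List.getD_cons_zero]
    apply List.map_congr_left
    intro r hr
    have := hlen r hr
    cases r with
    | nil => simp at this
    | cons a t => simp
  | succ n ih =>
    intro rows hne hlen
    rw [pvZipStar.eq_def]
    have hall : rows.all (fun r => ¬ r.isEmpty) = true := by
      simp only [List.all_eq_true, decide_eq_true_eq]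
      intro r hr
      have := hlen r hr
      cases r <;> simp_all
    rw [dif_pos ⟨hne, hall⟩]
    simp only [List.getD_cons_succ]
    rw [ih (rows.map List.tail)]
    · rw [List.map_map]
      apply List.map_congr_left
      intro r hr
      have := hlen r hr
      cases r with
      | nil => simp at this
      | cons a t => simp
    · cases rows with
      | nil => exact absurd rfl hne
      | cons _ _ => simp
    · intro t ht
      simp only [List.mem_map] at ht
      obtain ⟨r, hr, rfl⟩ := ht
      have := hlen r hr
      cases r with
      | nil => simp at this
      | cons a s => simpa using this

-- A's per-row value equals B's, in range.
theorem pv_pyGet_getD (row : List String) (i : Nat) (_h : i < row.length) :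
    (PySem.List.pyGet? row (Int.ofNat i)).getD "" = row.getD i "" := by
  have : PySem.List.pyGet? row (Int.ofNat i) = row[i]? := PySem.List.pyGet?_natCast row i
  rw [this, List.getD_eq_getElem?_getD]

-- ===== VERDICT (by name: the statement is the Claim_ definition above) =====
theorem get_project_and_task_columns_for_exp_change_spec : Claim_equal_get_project_and_task_columns_for_exp_change := by
  intro filtered_data _ hpre
  unfold Spec_get_project_and_task_columns_for_exp_change
  match filtered_data with
  | [] => exact absurd hpre (by simp [Pre_get_project_and_task_columns_for_exp_change])
  | hdr :: body =>
    unfold Pre_get_project_and_task_columns_for_exp_change at hpre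
    obtain ⟨-, _, _, hrows⟩ := hpre
    simp only [List.headD_cons, List.tail_cons] at hrows
    unfold get_project_and_task_columns_for_exp_change get_project_and_task_columns_for_exp_change_alt
    simp only
    set ip := (PySem.List.index? hdr "Project Number").getD 0 with hip
    set it := (PySem.List.index? hdr "Task Number").getD 0 with hit
    by_cases hb : body.length = 0
    · have : body = [] := List.length_eq_zero_iff.mp hb
      subst this
      simp
    · rw [if_neg hb]
      have hbne : body ≠ [] := by intro h; subst h; simp at hb
      rw [pv_foldl_append_map, pv_foldl_append_map]
      rw [pvZipStar_get ip body hbne (fun r hr => (hrows r hr).1),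
          pvZipStar_get it body hbne (fun r hr => (hrows r hr).2)]
      simp only [List.nil_append, Prod.mk.injEq]
      refine ⟨List.map_congr_left ?_, List.map_congr_left ?_⟩
      · intro r hr; exact pv_pyGet_getD r _ ((hrows r hr).1)
      · intro r hr; exact pv_pyGet_getD r _ ((hrows r hr).2)
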